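-- pv_equiv track=rewrite | github.com/DaanLe/Toepen | Complexity.py | complexity_info
-- ===== SOURCE A (Python) =====
-- import math
--
-- def complexity_info(suits, ranks, hand_size, betting):
--     """
--     Find the upper bound of the number of possible Information sets.
--     """
--     com = math.comb(suits*ranks, hand_size)
--     for i in range(1, hand_size):
--         com *= (suits*ranks) - (hand_size+i-1)
--         com *= (i+1)
--     if betting == 1:
--         com *= 2 ** hand_size
--     elif betting == 2:
--         com *= 2 ** (2*hand_size+1)
--     return com*2
-- ===== SOURCE B (Python) =====
-- import math
--
-- def complexity_info(suits, ranks, hand_size, betting):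
--     """
--     Upper bound on the number of information sets, as one closed-form
--     expression: comb(n,h) times the loop's product telescopes to
--     perm(n, 2h-1) (and perm(n, 0) = 1 covers the empty-hand case),
--     and all the power-of-two multipliers collapse into one exponent.
--     """
--     n = suits * ranks
--     exp = hand_size if betting == 1 else (2 * hand_size + 1 if betting == 2 else 0)
--     return math.perm(n, max(2 * hand_size - 1, 0)) << (exp + 1)
-- ===== Notes on version B (the rewrite author's own statement) =====
-- stated objective: simpler
-- what changed: Replaced comb(n,h) plus an explicit product loop and a branch-and-multiply betting step with a single closed-form expression: math.perm(n, max(2*hand_size-1, 0)) shifted left by one merged power-of-two exponent.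
import Mathlib
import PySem

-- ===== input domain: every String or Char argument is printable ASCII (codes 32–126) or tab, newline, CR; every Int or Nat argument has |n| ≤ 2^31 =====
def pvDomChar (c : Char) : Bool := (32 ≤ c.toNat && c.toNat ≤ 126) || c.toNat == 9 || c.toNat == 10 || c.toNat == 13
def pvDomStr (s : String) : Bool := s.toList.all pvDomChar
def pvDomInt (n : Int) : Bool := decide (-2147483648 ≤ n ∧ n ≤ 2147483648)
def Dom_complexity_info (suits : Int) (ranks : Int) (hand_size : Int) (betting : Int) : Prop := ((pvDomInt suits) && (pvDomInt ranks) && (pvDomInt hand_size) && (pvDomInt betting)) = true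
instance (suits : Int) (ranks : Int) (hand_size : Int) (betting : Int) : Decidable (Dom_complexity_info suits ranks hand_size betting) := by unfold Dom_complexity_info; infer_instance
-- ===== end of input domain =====

-- B replaces A's comb + product loop + branch-and-multiply with one closed-form
-- expression perm(n, max(2h-1,0)) shifted by a merged exponent; objective: simpler.

-- ===== PORT A =====
-- math.comb(n, k) for n, k ≥ 0 (Pre_ guarantees both; Python raises otherwise)
def pyComb (n k : Int) : Int := (Nat.choose n.toNat k.toNat : Int)

def complexity_info (suits : Int) (ranks : Int) (hand_size : Int) (betting : Int) : Int :=
  let com0 := pyComb (suits * ranks) hand_size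
  let com1 := (PySem.List.pyRange 1 hand_size 1).foldl
      (fun com i => com * ((suits * ranks) - (hand_size + i - 1)) * (i + 1)) com0
  let com2 :=
    if betting == 1 then com1 * 2 ^ hand_size.toNat
    else if betting == 2 then com1 * 2 ^ (2 * hand_size + 1).toNat
    else com1
  com2 * 2

-- ===== PORT B =====
-- math.perm(n, k) for n, k ≥ 0 (Pre_ guarantees n ≥ 0; k = max(2h-1,0) ≥ 0 by construction)
def pyPerm (n k : Int) : Int := (Nat.descFactorial n.toNat k.toNat : Int)

def complexity_info_alt (suits : Int) (ranks : Int) (hand_size : Int) (betting : Int) : Int :=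
  let n := suits * ranks
  let exp := if betting == 1 then hand_size else if betting == 2 then 2 * hand_size + 1 else 0
  -- Source B's 'x << (exp + 1)' is exact multiplication by 2^(exp+1); exp + 1 ≥ 1 on Pre_
  pyPerm n (max (2 * hand_size - 1) 0) * 2 ^ (exp + 1).toNat

-- ===== PRECONDITION & SPEC =====
-- Pre_ is exactly where A returns: math.comb raises ValueError when suits*ranks < 0 or hand_size < 0.
def Pre_complexity_info (suits : Int) (ranks : Int) (hand_size : Int) (betting : Int) : Prop :=
  0 ≤ suits * ranks ∧ 0 ≤ hand_size
instance (suits : Int) (ranks : Int) (hand_size : Int) (betting : Int) : Decidable (Pre_complexity_info suits ranks hand_size betting) := by unfold Pre_complexity_info; infer_instance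

def pvWitness_complexity_info : Int × Int × Int × Int := (4, 13, 4, 1)

def Spec_complexity_info (suits : Int) (ranks : Int) (hand_size : Int) (betting : Int) (out : Int) : Prop := out = complexity_info_alt suits ranks hand_size betting
instance (suits : Int) (ranks : Int) (hand_size : Int) (betting : Int) (out : Int) : Decidable (Spec_complexity_info suits ranks hand_size betting out) := by unfold Spec_complexity_info; infer_instance

-- ===== CLAIM (what is proved, stated in full; the proofs are below) =====
def Claim_equal_complexity_info : Prop := ∀ (suits : Int) (ranks : Int) (hand_size : Int) (betting : Int), Dom_complexity_info suits ranks hand_size betting → Pre_complexity_info suits ranks hand_size betting → Spec_complexity_info suits ranks hand_size betting (complexity_info suits ranks hand_size betting)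

-- ===== LEMMAS AND PROOFS =====

-- folding multiplications is the initial value times the product of the mapped list
theorem foldl_mul_eq_prod (l : List Int) (f g : Int → Int) (a : Int) :
    l.foldl (fun c i => c * f i * g i) a = a * (l.map (fun i => f i * g i)).prod := by
  induction l generalizing a with
  | nil => simp
  | cons x xs ih =>
      simp only [List.foldl_cons, List.map_cons, List.prod_cons]
      rw [ih]; ring

theorem list_prod_range (m : ℕ) (f : ℕ → Int) :
    ((List.range m).map f).prod = ∏ k ∈ Finset.range m, f k := by
  induction m with
  | zero => simp
  | succ m ih =>
      rw [List.range_succ, List.map_append, List.prod_append, Finset.prod_range_succ, ih]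
      simp

-- ∏_{k<m} (k+2) = (m+1)!
theorem prod_range_add_two (m : ℕ) :
    (∏ k ∈ Finset.range m, ((k : Int) + 2)) = ((m + 1).factorial : Int) := by
  induction m with
  | zero => simp [Nat.factorial]
  | succ m ih =>
      rw [Finset.prod_range_succ, ih]
      push_cast [Nat.factorial_succ]
      ring

-- the core identity: comb(N,H) times the loop's product is descFactorial N (2H-1)
theorem core_eq (N H : ℕ) (hH : 1 ≤ H) :
    (Nat.choose N H : Int) *
      (∏ k ∈ Finset.range (H - 1), (((N : Int) - ((H : Int) + ((1 : Int) + k) - 1)) * (((1 : Int) + k) + 1)))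
      = (Nat.descFactorial N (2 * H - 1) : Int) := by
  have hfac : ∀ k : ℕ, ((N : Int) - ((H : Int) + ((1 : Int) + k) - 1)) = (N : Int) - (H : Int) - (k : Int) := by
    intro k; ring
  by_cases hN : 2 * H - 1 ≤ N
  · have hstep : ∀ k ∈ Finset.range (H - 1),
        (((N : Int) - ((H : Int) + ((1 : Int) + k) - 1)) * (((1 : Int) + k) + 1))
          = (((N - H - k) : ℕ) : Int) * (((k : Int) + 2)) := by
      intro k hk
      rw [hfac k]
      have hk' : k < H - 1 := Finset.mem_range.mp hk
      have : H + k + 1 ≤ N := by omega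
      have : ((N - H - k : ℕ) : Int) = (N : Int) - (H : Int) - (k : Int) := by
        omega
      rw [this]; ring
    rw [Finset.prod_congr rfl hstep, Finset.prod_mul_distrib, prod_range_add_two]
    have hH1 : H - 1 + 1 = H := by omega
    rw [hH1]
    have hdesc : (N - H).descFactorial (H - 1) = ∏ k ∈ Finset.range (H - 1), (N - H - k) :=
      Nat.descFactorial_eq_prod_range (N - H) (H - 1)
    have hmul : (N - H).descFactorial ((2 * H - 1) - H) * N.descFactorial H = N.descFactorial (2 * H - 1) :=
      Nat.descFactorial_mul_descFactorial (by omega)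
    have hHsub : (2 * H - 1) - H = H - 1 := by omega
    rw [hHsub] at hmul
    have hchoose : N.descFactorial H = H.factorial * N.choose H :=
      Nat.descFactorial_eq_factorial_mul_choose N H
    have : (N.choose H : Int) * ((∏ k ∈ Finset.range (H - 1), ((N - H - k : ℕ) : Int)) * (H.factorial : Int))
        = ((N - H).descFactorial (H - 1) * N.descFactorial H : ℕ) := by
      push_cast [hdesc, hchoose, Finset.prod_natCast]
      ring
    rw [this, hmul]
  · rw [Nat.descFactorial_eq_zero_iff_lt.mpr (by omega)]
    push_cast
    by_cases hNH : N < H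
    · rw [Nat.choose_eq_zero_of_lt hNH]; simp
    · have hk0 : N - H ∈ Finset.range (H - 1) := Finset.mem_range.mpr (by omega)
      rw [Finset.prod_eq_zero hk0 (by
        have h0 : ((N : Int) - ((H : Int) + ((1 : Int) + (N - H : ℕ)) - 1)) = 0 := by omega
        rw [h0, zero_mul])]
      simp

-- A's loop result equals B's falling factorial, on Pre_
theorem com_eq (suits ranks hand_size : Int) (hn : 0 ≤ suits * ranks) (hh : 0 ≤ hand_size) :
    (PySem.List.pyRange 1 hand_size 1).foldl
        (fun com i => com * (suits * ranks - (hand_size + i - 1)) * (i + 1))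
        (pyComb (suits * ranks) hand_size)
      = pyPerm (suits * ranks) (max (2 * hand_size - 1) 0) := by
  obtain ⟨N, hN⟩ : ∃ N : ℕ, suits * ranks = (N : Int) :=
    ⟨(suits * ranks).toNat, (Int.toNat_of_nonneg hn).symm⟩
  obtain ⟨H, hH⟩ : ∃ H : ℕ, hand_size = (H : Int) := ⟨hand_size.toNat, (Int.toNat_of_nonneg hh).symm⟩
  by_cases hpos : hand_size > 0
  · have hH1 : 1 ≤ H := by omega
    rw [foldl_mul_eq_prod _ (fun i => suits * ranks - (hand_size + i - 1)) (fun i => i + 1)]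
    rw [PySem.List.pyRange_one]
    have hlen : (hand_size - 1).toNat = H - 1 := by omega
    rw [hlen, List.map_map, list_prod_range]
    rw [hN, hH]
    have hmax : max (2 * (H : Int) - 1) 0 = 2 * (H : Int) - 1 := by omega
    have h21 : ((2 : Int) * (H : Int) - 1).toNat = 2 * H - 1 := by omega
    unfold pyComb pyPerm
    rw [hmax, h21, Int.toNat_natCast, Int.toNat_natCast]
    have := core_eq N H hH1
    simpa [Function.comp] using this
  · have hH0 : hand_size = 0 := by omega
    rw [hH0]
    simp [PySem.List.pyRange, pyComb, pyPerm]

-- ===== VERDICT (by name: the statement is the Claim_ definition above) =====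
theorem complexity_info_spec : Claim_equal_complexity_info := by
  intro suits ranks hand_size betting _ hpre
  obtain ⟨hn, hh⟩ := hpre
  unfold Spec_complexity_info
  have hcom := com_eq suits ranks hand_size hn hh
  simp only [complexity_info, complexity_info_alt, hcom]
  by_cases h1 : betting = 1
  · have he : (hand_size + 1).toNat = hand_size.toNat + 1 := by omega
    simp only [h1, if_pos, beq_self_eq_true, he, pow_succ]
    ring
  · by_cases h2 : betting = 2
    · have he : (2 * hand_size + 1 + 1).toNat = (2 * hand_size + 1).toNat + 1 := by omega
      have b1 : (betting == 1) = false := by simp [h2]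
      have b2 : (betting == 2) = true := by simp [h2]
      simp only [b1, b2, Bool.false_eq_true, if_false, if_true, he, pow_succ]
      ring
    · have b1 : (betting == 1) = false := by simp [h1]
      have b2 : (betting == 2) = false := by simp [h2]
      simp only [b1, b2, Bool.false_eq_true, if_false]
      norm_num
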